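-- pv_equiv track=rewrite | github.com/IsseBisse/adventofcode | 2016/python/4/Security.py | calculateChecksum
-- ===== SOURCE A (Python) =====
-- def calculateChecksum(name):
-- 	char_in_name = list(set(name))
-- 	char_in_name.sort()
-- 	char_occurance = [0] * len(char_in_name)
--
-- 	for char in name:
-- 		char_ind = char_in_name.index(char)
-- 		char_occurance[char_ind] += 1
--
-- 	max_ind = sorted(range(len(char_occurance)), key=lambda k: char_occurance[k], reverse=True)
--
-- 	checksum = ""
-- 	for ind in max_ind[0:5]:
-- 		checksum += char_in_name[ind]
--
-- 	return checksum
-- ===== SOURCE B (Python) =====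
-- def calculateChecksum(name):
-- 	# Bucket-by-count: count chars once into a dict, group the sorted distinct
-- 	# chars into buckets keyed by their count, then scan the counts descending.
-- 	counts = {}
-- 	for ch in name:
-- 		counts[ch] = counts.get(ch, 0) + 1
--
-- 	buckets = {}
-- 	for ch in sorted(counts):
-- 		buckets.setdefault(counts[ch], []).append(ch)
--
-- 	res = []
-- 	for c in sorted(buckets, reverse=True):
-- 		res += buckets[c]
--
-- 	return "".join(res[:5])
-- ===== Notes on version B (the rewrite author's own statement) =====
-- stated objective: faster
-- what changed: Replaces A's per-char list.index scans and comparison sort of indices with a single dict count pass, buckets of sorted distinct chars keyed by count, and a descending scan over counts.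
import Mathlib
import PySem

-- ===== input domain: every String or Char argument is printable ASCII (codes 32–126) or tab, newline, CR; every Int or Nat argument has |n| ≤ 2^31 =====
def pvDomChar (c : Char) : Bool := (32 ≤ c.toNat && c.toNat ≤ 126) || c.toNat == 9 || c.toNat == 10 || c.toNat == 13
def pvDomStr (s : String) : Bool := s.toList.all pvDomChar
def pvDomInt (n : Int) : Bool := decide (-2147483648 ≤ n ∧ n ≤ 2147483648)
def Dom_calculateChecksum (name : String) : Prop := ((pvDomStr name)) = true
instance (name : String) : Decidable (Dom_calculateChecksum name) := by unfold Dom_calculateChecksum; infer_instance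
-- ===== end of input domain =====

-- B replaces A's per-char list.index scans and reverse comparison sort with a dict count pass,
-- buckets of the sorted distinct chars keyed by count, and a descending scan over counts (faster).

-- ===== PORT A =====
def calculateChecksum (name : String) : String :=
  let cs := name.toList
  -- list(set(name)); .sort() — sorting the set without a key, ties impossible (distinct elements)
  let charInName := PySem.List.sorted (PySem.Set.ofList cs) (fun x => x) false
  -- char_occurance[char_in_name.index(char)] += 1 ; 'none' branch unreachable (every char of
  -- name is in char_in_name; Python's .index would raise ValueError exactly there)
  let charOccurance : List Int :=
    cs.foldl (fun occ ch =>
      match PySem.List.index? charInName ch with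
      | some i => occ.set i (occ.getD i 0 + 1)
      | none => occ)
      (List.replicate charInName.length 0)
  let maxInd := PySem.List.sorted (PySem.List.pyRange 0 (charOccurance.length : Int))
      (fun k => PySem.List.pyGetD charOccurance k 0) true
  -- checksum += char_in_name[ind]; every ind taken from max_ind is a valid index
  let checksum := (PySem.List.slice maxInd (some 0) (some 5)).foldl
      (fun acc ind => acc ++ [PySem.List.pyGetD charInName ind ' ']) ([] : List Char)
  String.mk checksum

-- ===== PORT B =====
def calculateChecksum_alt (name : String) : String :=
  let cs := name.toList
  -- counts[ch] = counts.get(ch, 0) + 1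
  let counts : PySem.Dict Char Int := cs.foldl (fun d ch => d.insert ch (d.getD ch 0 + 1)) PySem.Dict.empty
  -- for ch in sorted(counts): buckets.setdefault(counts[ch], []).append(ch)
  -- (counts[ch] cannot raise: ch ranges over counts' keys)
  let buckets := (PySem.List.sorted counts.keys (fun x => x) false).foldl
      (fun d ch => d.modify (counts.getD ch 0) [] (fun l => l ++ [ch])) PySem.Dict.empty
  -- for c in sorted(buckets, reverse=True): res += buckets[c]
  -- (buckets[c] cannot raise: c ranges over buckets' keys)
  let res := (PySem.List.sorted buckets.keys (fun x => x) true).foldl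
      (fun acc c => acc ++ buckets.getD c []) ([] : List Char)
  -- "".join(res[:5]) — res is a list of single characters
  String.mk (PySem.List.slice res none (some 5))

-- ===== PRECONDITION & SPEC =====
def Spec_calculateChecksum (name : String) (out : String) : Prop := out = calculateChecksum_alt name
instance (name : String) (out : String) : Decidable (Spec_calculateChecksum name out) := by unfold Spec_calculateChecksum; infer_instance

-- ===== CLAIM (what is proved, stated in full; the proofs are below) =====
def Claim_equal_calculateChecksum : Prop := ∀ (name : String), Dom_calculateChecksum name → Spec_calculateChecksum name (calculateChecksum name)

-- ===== LEMMAS AND PROOFS =====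

-- insertBy skips over a block of elements it does not go before
theorem insertBy_append_of_not_before {α : Type} (before : α → α → Bool) (x : α)
    (L R : List α) (h : ∀ y ∈ L, before x y = false) :
    PySem.List.insertBy before x (L ++ R) = L ++ PySem.List.insertBy before x R := by
  induction L with
  | nil => rfl
  | cons y L ih =>
    simp only [List.cons_append, PySem.List.insertBy, h y (by simp)]
    simp only [Bool.false_eq_true, if_false, List.cons.injEq, true_and]
    exact ih (fun z hz => h z (by simp [hz]))

theorem insertBy_cons_of_before {α : Type} (before : α → α → Bool) (x y : α) (R : List α)
    (h : before x y = true) :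
    PySem.List.insertBy before x (y :: R) = x :: y :: R := by
  simp [PySem.List.insertBy, h]

-- A stable reverse sort is the concatenation, over the strictly descending value list,
-- of the buckets of elements with that key, each in original order.
theorem sorted_rev_eq_flatMap_buckets {α : Type} (key : α → Int) (vals : List Int)
    (hv : vals.Pairwise (· > ·)) (xs : List α) (hx : ∀ x ∈ xs, key x ∈ vals) :
    PySem.List.sorted xs key true
      = vals.flatMap (fun c => xs.filter (fun x => key x == c)) := by
  rw [PySem.List.sorted_rev_eq_foldl_insertBy]
  have step : ∀ (x : α) (ws : List α), key x ∈ vals →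
      PySem.List.insertBy (fun a b => decide (key b < key a)) x
        (vals.flatMap (fun c => ws.filter (fun w => key w == c)))
      = vals.flatMap (fun c => (ws ++ [x]).filter (fun w => key w == c)) := by
    intro x ws hxv
    obtain ⟨V1, V2, hsplit⟩ := List.append_of_mem hxv
    subst hsplit
    have hpw := hv
    rw [List.pairwise_append] at hpw
    obtain ⟨hp1, hp2, hcross⟩ := hpw
    rw [List.pairwise_cons] at hp2
    obtain ⟨hlt2, _⟩ := hp2
    have hgt1 : ∀ c ∈ V1, key x < c := fun c hc => hcross c hc (key x) (by simp)
    -- rewrite both sides through the split of vals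
    simp only [List.flatMap_append, List.flatMap_cons]
    -- the left block: all elements have key ≥ key x
    have hL : ∀ y ∈ (V1.flatMap (fun c => ws.filter (fun w => key w == c)))
        ++ ws.filter (fun w => key w == key x),
        (decide (key y < key x)) = false := by
      intro y hy
      rcases List.mem_append.mp hy with hy | hy
      · obtain ⟨c, hc, hyc⟩ := List.mem_flatMap.mp hy
        have := List.of_mem_filter hyc
        have hkey : key y = c := by simpa using this
        have : key x < c := hgt1 c hc
        simp [hkey]; omega
      · have := List.of_mem_filter hy
        have hkey : key y = key x := by simpa using this
        simp [hkey]
    have hR : PySem.List.insertBy (fun a b => decide (key b < key a)) x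
        (V2.flatMap (fun c => ws.filter (fun w => key w == c)))
        = x :: V2.flatMap (fun c => ws.filter (fun w => key w == c)) := by
      cases hV2 : V2.flatMap (fun c => ws.filter (fun w => key w == c)) with
      | nil => rfl
      | cons y R =>
        have hy : y ∈ V2.flatMap (fun c => ws.filter (fun w => key w == c)) := by
          rw [hV2]; simp
        obtain ⟨c, hc, hyc⟩ := List.mem_flatMap.mp hy
        have hkey : key y = c := by simpa using List.of_mem_filter hyc
        have : c < key x := hlt2 c hc
        exact insertBy_cons_of_before _ _ _ _ (by simp [hkey]; omega)
    calc PySem.List.insertBy (fun a b => decide (key b < key a)) x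
          (V1.flatMap (fun c => ws.filter (fun w => key w == c)) ++
            (ws.filter (fun w => key w == key x) ++
              V2.flatMap (fun c => ws.filter (fun w => key w == c))))
        = (V1.flatMap (fun c => ws.filter (fun w => key w == c)) ++
            ws.filter (fun w => key w == key x)) ++
            (x :: V2.flatMap (fun c => ws.filter (fun w => key w == c))) := by
          rw [← List.append_assoc,
            insertBy_append_of_not_before _ _ _ _ hL, hR]
      _ = V1.flatMap (fun c => (ws ++ [x]).filter (fun w => key w == c)) ++
            ((ws ++ [x]).filter (fun w => key w == key x) ++
              V2.flatMap (fun c => (ws ++ [x]).filter (fun w => key w == c))) := by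
          have h1 : V1.flatMap (fun c => (ws ++ [x]).filter (fun w => key w == c))
              = V1.flatMap (fun c => ws.filter (fun w => key w == c)) := by
            apply List.flatMap_congr
            intro c hc
            have : key x < c := hgt1 c hc
            simp [List.filter_append]
            intro h; exfalso; omega
          have h2 : V2.flatMap (fun c => (ws ++ [x]).filter (fun w => key w == c))
              = V2.flatMap (fun c => ws.filter (fun w => key w == c)) := by
            apply List.flatMap_congr
            intro c hc
            have : c < key x := hlt2 c hc
            simp [List.filter_append]
            intro h; exfalso; omega
          have h3 : (ws ++ [x]).filter (fun w => key w == key x)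
              = ws.filter (fun w => key w == key x) ++ [x] := by
            simp [List.filter_append]
          rw [h1, h2, h3]
          simp [List.append_assoc]
  -- fold the step through the list
  suffices h : ∀ (l ws : List α), (∀ x ∈ l, key x ∈ vals) →
      l.foldl (fun acc x => PySem.List.insertBy (fun a b => decide (key b < key a)) x acc)
        (vals.flatMap (fun c => ws.filter (fun w => key w == c)))
      = vals.flatMap (fun c => (ws ++ l).filter (fun w => key w == c)) by
    have hnilfm : (vals.flatMap (fun _ => ([] : List α))) = [] := by
      induction vals <;> simp_all
    have := h xs [] hx
    simp only [List.filter_nil] at this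
    rw [hnilfm] at this
    exact this
  intro l
  induction l with
  | nil => intro ws _; simp
  | cons x l ih =>
    intro ws hmem
    simp only [List.foldl_cons]
    rw [step x ws (hmem x (by simp)), ih (ws ++ [x]) (fun z hz => hmem z (by simp [hz]))]
    simp

-- setting position i (holding c) of a mapped nodup list updates the function at c
theorem map_set_nodup {α β : Type} [DecidableEq α] (S : List α) (hnd : S.Nodup)
    (f : α → β) (i : Nat) (hi : i < S.length) (c : α) (hc : S[i] = c) (v : β) :
    (S.map f).set i v = S.map (fun x => if x = c then v else f x) := by
  apply List.ext_getElem
  · simp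
  · intro j h1 h2
    simp only [List.length_set, List.length_map] at h1
    rw [List.getElem_set, List.getElem_map]
    by_cases hij : i = j
    · subst hij
      simp [hc]
    · have : S[j] ≠ c := by
        intro hjc
        exact hij (hnd.getElem_inj_iff.mp (hc.trans hjc.symm))
      simp [hij, this]

-- the counting loop of A computes, at each position of the nodup list S, the count in cs
theorem foldl_index_count {α : Type} [DecidableEq α] [BEq α] [LawfulBEq α]
    (S : List α) (hnd : S.Nodup) :
    ∀ (l : List α) (f : α → Int), (∀ c ∈ l, c ∈ S) →
    l.foldl (fun occ ch =>
      match PySem.List.index? S ch with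
      | some i => occ.set i (occ.getD i 0 + 1)
      | none => occ) (S.map f)
    = S.map (fun ch => f ch + (l.count ch : Int)) := by
  intro l
  induction l with
  | nil =>
    intro f _
    simp
  | cons c l ih =>
    intro f hmem
    have hcS : c ∈ S := hmem c (by simp)
    have hsome : (PySem.List.index? S c).isSome = true :=
      (PySem.List.index?_isSome_iff S c).mpr hcS
    obtain ⟨i, hi⟩ := Option.isSome_iff_exists.mp hsome
    obtain ⟨hk, hSi, _⟩ := PySem.List.getElem_of_index?_eq_some hi
    have hgetD : (S.map f).getD i 0 = f c := by
      rw [List.getD_eq_getElem _ _ (by simpa using hk), List.getElem_map, hSi]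
    simp only [List.foldl_cons, hi, hgetD]
    rw [map_set_nodup S hnd f i hk c hSi]
    rw [ih _ (fun z hz => hmem z (by simp [hz]))]
    apply List.map_congr_left
    intro a _
    by_cases hac : a = c
    · subst hac
      simp
      ring
    · simp [hac, List.count_cons]
      exact fun h => hac h.symm

-- ===== VERDICT helper: the main equivalence =====
theorem calculateChecksum_eq (name : String) :
    calculateChecksum name = calculateChecksum_alt name := by
  simp only [calculateChecksum, calculateChecksum_alt]
  set cs := name.toList with hcs
  rw [PySem.Dict.foldl_insert_getD_add_one_eq_counter, PySem.Dict.keys_counter]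
  set S := PySem.List.sorted (PySem.Set.ofList cs) (fun x => x) false with hS
  -- basic facts about S
  have hpwS : S.Pairwise (· < ·) := PySem.List.sorted_ofList_pairwise_lt cs
  have hndS : S.Nodup := hpwS.imp (fun h => ne_of_lt h)
  have hmemS : ∀ c : Char, c ∈ S ↔ c ∈ cs := by
    intro c
    rw [hS, PySem.List.mem_sorted, PySem.Set.mem_ofList]
  set cnt : Char → Int := fun ch => (cs.count ch : Int) with hcnt
  -- A's occurrence list
  have hocc : cs.foldl (fun occ ch =>
      match PySem.List.index? S ch with
      | some i => occ.set i (occ.getD i 0 + 1)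
      | none => occ) (List.replicate S.length (0 : Int))
      = S.map cnt := by
    rw [← List.map_const' (l := S) (b := (0 : Int)),
      foldl_index_count S hndS cs _ (fun c hc => (hmemS c).mpr hc)]
    simp [hcnt]
  rw [hocc]
  -- rewrite A's index range
  simp only [List.length_map]
  rw [show ((S.length : Int)) = ((S.length : Nat) : Int) from rfl,
    PySem.List.pyRange_zero_natCast]
  -- the key of an in-range index is the count of the char there
  have hkey : ∀ (j : Nat) (hj : j < S.length),
      PySem.List.pyGetD (S.map cnt) ((j : Nat) : Int) 0 = cnt (S[j]'hj) := by
    intro j hj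
    rw [PySem.List.pyGetD_natCast,
      List.getD_eq_getElem _ _ (by simpa using hj), List.getElem_map]
  -- B's buckets dictionary over pairs (count, char)
  have hfm := List.foldl_map
    (f := fun ch : Char => ((PySem.Dict.counter cs).getD ch 0, ch))
    (g := fun (d : PySem.Dict Int (List Char)) (p : Int × Char) =>
      d.modify p.1 [] (fun l => l ++ [p.2]))
    (l := S) (init := PySem.Dict.empty)
  simp only at hfm
  rw [← hfm]
  set D := (S.map (fun ch => ((PySem.Dict.counter cs).getD ch 0, ch))).foldl
      (fun d p => d.modify p.1 [] (fun l => l ++ [p.2])) PySem.Dict.empty with hD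
  have hkeysD : D.keys = PySem.Set.ofList (S.map (fun ch => (PySem.Dict.counter cs).getD ch 0)) := by
    rw [hD, PySem.Dict.keys_foldl_modify_key (key := Prod.fst), List.map_map]
    rfl
  have hndKeys : D.keys.Nodup := by
    rw [hkeysD]
    exact PySem.Set.nodup_ofList _
  -- the descending value list: the distinct counts, sorted descending
  set vals := PySem.List.sorted D.keys (fun x => x) true with hvals
  have hvals_pw : vals.Pairwise (· > ·) := by
    have h1 := PySem.List.sorted_pairwise_rev D.keys (fun x => x)
    have h2 : vals.Nodup :=
      ((PySem.List.sorted_perm D.keys (fun x => x) true).nodup_iff).mpr hndKeys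
    rw [← hvals] at h1
    exact (h1.and h2).imp (fun h => lt_of_le_of_ne h.1 (Ne.symm h.2))
  have hkeymem : ∀ k ∈ (List.range S.length).map (fun k => ((k : Nat) : Int)),
      PySem.List.pyGetD (S.map cnt) k 0 ∈ vals := by
    intro k hk
    obtain ⟨j, hj, rfl⟩ := List.mem_map.mp hk
    rw [List.mem_range] at hj
    rw [hkey j hj, hvals, PySem.List.mem_sorted, hkeysD, PySem.Set.mem_ofList,
      List.mem_map]
    exact ⟨S[j]'hj, List.getElem_mem hj, by simp [PySem.Dict.getD_counter, hcnt]⟩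
  -- A's sorted indices as buckets over the descending values
  rw [sorted_rev_eq_flatMap_buckets _ vals hvals_pw _ hkeymem]
  have hbucket : ∀ c : Int, D.getD c [] = S.filter (fun ch => cnt ch == c) := by
    intro c
    rw [hD, PySem.Dict.getD_foldl_modify_append]
    rw [List.filter_map, List.map_map]
    have h1 : (PySem.Dict.empty : PySem.Dict Int (List Char)).getD c [] = [] := rfl
    have h2 : ((fun p : Int × Char => p.2) ∘
        (fun ch => ((PySem.Dict.counter cs).getD ch 0, ch))) = id := rfl
    rw [h1, List.nil_append, h2, List.map_id]
    apply List.filter_congr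
    intro ch _
    simp only [Function.comp_apply, PySem.Dict.getD_counter, hcnt]
  simp only [hbucket]
  -- both sides: drop the strings, slices and the take 5
  refine congrArg String.mk ?_
  have hsliceA : ∀ l : List Int, PySem.List.slice l (some 0) (some 5) = l.take 5 := by
    intro l
    simp [PySem.List.slice]
  rw [hsliceA, PySem.List.slice_to _ (by norm_num : (0 : Int) ≤ 5),
    show ((5 : Int).toNat) = 5 from rfl]
  rw [PySem.List.foldl_append_singleton_eq_map, List.nil_append, List.map_take]
  rw [PySem.List.foldl_append_eq_flatMap, List.nil_append]
  refine congrArg (List.take 5) ?_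
  -- the heart: A's index buckets mapped to chars are B's char buckets
  rw [List.map_flatMap]
  have hSmap : (List.range S.length).map (fun j => S.getD j ' ') = S := by
    apply List.ext_getElem
    · simp
    · intro j h1 h2
      simp only [List.getElem_map, List.getElem_range]
      rw [List.getD_eq_getElem _ _ (by simpa using h2)]
  apply List.flatMap_congr
  intro c _
  rw [List.filter_map, List.map_map]
  conv_rhs => rw [← hSmap, List.filter_map]
  have hfilt : (List.range S.length).filter
      ((fun k => PySem.List.pyGetD (S.map cnt) k 0 == c) ∘ (fun k => ((k : Nat) : Int)))
      = (List.range S.length).filter ((fun ch => cnt ch == c) ∘ (fun j => S.getD j ' ')) := by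
    apply List.filter_congr
    intro j hj
    rw [List.mem_range] at hj
    simp only [Function.comp_apply]
    rw [hkey j hj, List.getD_eq_getElem _ _ hj]
  rw [hfilt]
  apply List.map_congr_left
  intro j hjmem
  have hj : j < S.length := List.mem_range.mp (List.mem_filter.mp hjmem).1
  simp only [Function.comp_apply]
  rw [PySem.List.pyGetD_natCast]

-- ===== VERDICT (by name: the statement is the Claim_ definition above) =====
theorem calculateChecksum_spec : Claim_equal_calculateChecksum := by
  intro name _
  show calculateChecksum name = calculateChecksum_alt name
  exact calculateChecksum_eq name
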